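-- pv_equiv track=rewrite | github.com/DancingOnAir/LeetcodePythonSolution | Stack/2398_maximum_number_of_robots_within_budget.py | maximumRobots1
-- ===== SOURCE A (Python) =====
-- from typing import List
-- from itertools import accumulate
--
-- def maximumRobots1(chargeTimes: List[int], runningCosts: List[int], budget: int) -> int:
--     n = len(chargeTimes)
--     l = 0
--     res = 0
--     pre_sum = list(accumulate(runningCosts, initial=0))
--     for r in range(n):
--         while max(chargeTimes[l: r + 1], default=0) + (pre_sum[r+1] - pre_sum[l]) * (r - l + 1) > budget:
--             l += 1
--         res = max(res, r - l + 1)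
--     return res
-- ===== SOURCE B (Python) =====
-- from collections import deque
--
-- def maximumRobots1(chargeTimes, runningCosts, budget):
--     dq = deque()  # indices of strictly decreasing charge times, front = window max
--     s = 0
--     l = 0
--     res = 0
--     for r in range(len(chargeTimes)):
--         while dq and chargeTimes[dq[-1]] <= chargeTimes[r]:
--             dq.pop()
--         dq.append(r)
--         s += runningCosts[r]
--         while dq and chargeTimes[dq[0]] + (r - l + 1) * s > budget:
--             if dq[0] == l:
--                 dq.popleft()
--             s -= runningCosts[l]
--             l += 1
--         res = max(res, r - l + 1)
--     return res
-- ===== Notes on version B (the rewrite author's own statement) =====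
-- stated objective: faster
-- what changed: B replaces A's per-step recomputation of max(chargeTimes[l:r+1]) and the prefix-sum array by a monotonic index deque for the window maximum and a running window sum, turning the two-pointer scan from O(n^2) into O(n).
-- outside the precondition, e.g. on maximumRobots1([0, -1], [0, 0, -1], -1): A returns 0, B returns 1
import Mathlib
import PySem

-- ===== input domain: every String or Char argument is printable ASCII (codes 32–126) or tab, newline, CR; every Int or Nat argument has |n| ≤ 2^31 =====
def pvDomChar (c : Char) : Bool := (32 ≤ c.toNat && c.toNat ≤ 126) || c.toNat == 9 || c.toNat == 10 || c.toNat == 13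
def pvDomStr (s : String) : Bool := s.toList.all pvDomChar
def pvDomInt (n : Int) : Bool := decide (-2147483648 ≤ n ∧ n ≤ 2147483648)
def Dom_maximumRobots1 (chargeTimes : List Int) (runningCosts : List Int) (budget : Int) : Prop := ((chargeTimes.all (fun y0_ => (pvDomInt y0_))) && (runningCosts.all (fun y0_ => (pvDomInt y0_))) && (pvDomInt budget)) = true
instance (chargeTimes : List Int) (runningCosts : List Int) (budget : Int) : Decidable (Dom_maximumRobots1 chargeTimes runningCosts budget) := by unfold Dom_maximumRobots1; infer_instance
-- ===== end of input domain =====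

-- B replaces A's per-step O(window) slice-max by a monotonic index deque plus a running window
-- sum, turning the O(n^2) two-pointer scan into an O(n) one; equivalence is proved on
-- Pre_ (len chargeTimes ≤ len runningCosts, 0 ≤ budget), where A returns normally.

-- ===== PORT A =====
-- max(xs, default=0)
def pyMaxD (xs : List Int) : Int :=
  match xs with
  | [] => 0
  | x :: t => t.foldl max x

-- while loop of A, fueled (under Pre_ it stops at l ≤ r+1, so fuel r+1 is never exhausted);
-- pre_sum indices are nonnegative and in range under Pre_, ported with pyGetD
def aWhile (ct preSum : List Int) (budget : Int) (r : Nat) : Nat → Nat → Nat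
  | 0, l => l
  | fuel+1, l =>
    if pyMaxD (PySem.List.slice ct (some (l : Int)) (some ((r : Int) + 1)))
        + (PySem.List.pyGetD preSum ((r : Int) + 1) 0 - PySem.List.pyGetD preSum (l : Int) 0)
          * ((r : Int) - (l : Int) + 1) > budget
    then aWhile ct preSum budget r fuel (l + 1)
    else l

def maximumRobots1 (chargeTimes : List Int) (runningCosts : List Int) (budget : Int) : Int :=
  let n := chargeTimes.length
  let preSum := List.scanl (· + ·) 0 runningCosts
  let step := fun (st : Nat × Int) (r : Nat) =>
    let l := aWhile chargeTimes preSum budget r (r + 1) st.1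
    (l, max st.2 ((r : Int) - (l : Int) + 1))
  ((List.range n).foldl step (0, 0)).2

-- ===== PORT B =====
-- "while dq and ct[dq[-1]] <= ct[r]: dq.pop(); dq.append(r)" — pops from the back
def bPush (ct : List Int) (r : Nat) (dq : List Nat) : List Nat :=
  (dq.reverse.dropWhile (fun (i : Nat) => PySem.List.pyGetD ct (i : Int) 0 ≤ PySem.List.pyGetD ct (r : Int) 0)).reverse ++ [r]

-- inner while of B, fueled (dq empties by l = r+1, so fuel r+1 is never exhausted)
def bWhile (ct rc : List Int) (budget : Int) (r : Nat) : Nat → (List Nat × Int × Nat) → (List Nat × Int × Nat)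
  | 0, st => st
  | fuel+1, (dq, s, l) =>
    match dq with
    | [] => ([], s, l)
    | f :: rest =>
      if PySem.List.pyGetD ct (f : Int) 0 + ((r : Int) - (l : Int) + 1) * s > budget then
        bWhile ct rc budget r fuel
          ((if f = l then rest else f :: rest), s - PySem.List.pyGetD rc (l : Int) 0, l + 1)
      else (f :: rest, s, l)

def maximumRobots1_alt (chargeTimes : List Int) (runningCosts : List Int) (budget : Int) : Int :=
  let step := fun (st : List Nat × Int × Nat × Int) (r : Nat) =>
    let dq1 := bPush chargeTimes r st.1
    let s1 := st.2.1 + PySem.List.pyGetD runningCosts (r : Int) 0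
    let w := bWhile chargeTimes runningCosts budget r (r + 1) (dq1, s1, st.2.2.1)
    (w.1, w.2.1, w.2.2, max st.2.2.2 ((r : Int) - (w.2.2 : Int) + 1))
  ((List.range chargeTimes.length).foldl step ([], 0, 0, 0)).2.2.2

-- ===== PRECONDITION & SPEC =====
-- Pre_ excludes (a) runningCosts shorter than chargeTimes, where A's pre_sum[r+1] raises
-- IndexError, and (b) negative budgets, on which A's left pointer overruns the window end:
-- there A raises IndexError on most inputs and on the rest returns a value that depends on
-- the leftover overrun pointer (see cites).
def Pre_maximumRobots1 (chargeTimes : List Int) (runningCosts : List Int) (budget : Int) : Prop :=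
  chargeTimes.length ≤ runningCosts.length ∧ 0 ≤ budget

instance (chargeTimes : List Int) (runningCosts : List Int) (budget : Int) : Decidable (Pre_maximumRobots1 chargeTimes runningCosts budget) := by
  unfold Pre_maximumRobots1; infer_instance

def pvWitness_maximumRobots1 : List Int × List Int × Int := ([3, 6, 1, 3, 4], [2, 1, 3, 4, 5], 25)

def Spec_maximumRobots1 (chargeTimes : List Int) (runningCosts : List Int) (budget : Int) (out : Int) : Prop := out = maximumRobots1_alt chargeTimes runningCosts budget
instance (chargeTimes : List Int) (runningCosts : List Int) (budget : Int) (out : Int) : Decidable (Spec_maximumRobots1 chargeTimes runningCosts budget out) := by unfold Spec_maximumRobots1; infer_instance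

-- ===== CLAIM (what is proved, stated in full; the proofs are below) =====
def Claim_equal_maximumRobots1 : Prop := ∀ (chargeTimes : List Int) (runningCosts : List Int) (budget : Int), Dom_maximumRobots1 chargeTimes runningCosts budget → Pre_maximumRobots1 chargeTimes runningCosts budget → Spec_maximumRobots1 chargeTimes runningCosts budget (maximumRobots1 chargeTimes runningCosts budget)

-- ===== LEMMAS AND PROOFS =====

-- i is "good" for window [_, e): every later index in the window has strictly smaller charge
def goodB (ct : List Int) (e i : Nat) : Bool :=
  (List.range' (i+1) (e - (i+1))).all (fun j => decide (ct.getD j 0 < ct.getD i 0))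

-- specification of B's deque for window [l, e)
def dqSpec (ct : List Int) (l e : Nat) : List Nat :=
  (List.range' l (e - l)).filter (goodB ct e)

-- dqSpec of an empty window
theorem dqSpec_empty (ct : List Int) (e : Nat) : dqSpec ct e e = [] := by
  simp [dqSpec]

-- prefix sums: getD of scanl is the sum of a prefix
theorem scanl_getD (rc : List Int) (a : Int) (i : Nat) (h : i ≤ rc.length) :
    (List.scanl (· + ·) a rc).getD i 0 = a + ((rc.take i).sum) := by
  induction rc generalizing a i with
  | nil =>
    have : i = 0 := by simpa using h
    subst this; simp [List.scanl_nil]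
  | cons x t ih =>
    cases i with
    | zero => simp [List.scanl_cons]
    | succ j =>
      rw [List.scanl_cons, List.getD_cons_succ, ih (a + x) j (by simpa using h)]
      simp; ring

theorem scanl_getD_succ (rc : List Int) (i : Nat) (h : i < rc.length) :
    (List.scanl (· + ·) (0:Int) rc).getD (i+1) 0
      = (List.scanl (· + ·) (0:Int) rc).getD i 0 + rc.getD i 0 := by
  rw [scanl_getD rc 0 (i+1) (by omega), scanl_getD rc 0 i (by omega),
    List.sum_take_succ rc i h]
  simp [List.getD, List.getElem?_eq_getElem h]

-- the slice ct[l:r+1] as a map over indices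
theorem slice_eq_map (ct : List Int) (l len : Nat) (h : l + len ≤ ct.length) :
    (ct.drop l).take len = (List.range' l len).map (fun i => ct.getD i 0) := by
  apply List.ext_getElem
  · simp; omega
  · intro k h1 h2
    have hk : k < len := by simpa using h2
    have hlk : l + k < ct.length := by omega
    simp [List.getElem_take, List.getElem_drop, List.getElem_range', List.getD,
      List.getElem?_eq_getElem hlk]

-- pyMaxD over an appended singleton
theorem pyMaxD_append (xs : List Int) (a : Int) (h : xs ≠ []) :
    pyMaxD (xs ++ [a]) = max (pyMaxD xs) a := by
  cases xs with
  | nil => simp at h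
  | cons x t => simp [pyMaxD, List.foldl_append]

-- every member is at most pyMaxD
theorem init_le_foldl_max (t : List Int) (b : Int) : b ≤ t.foldl max b := by
  induction t generalizing b with
  | nil => simp
  | cons y s ih => exact le_trans (le_max_left b y) (ih (max b y))

theorem foldl_max_ge (t : List Int) (b x : Int) (h : x ∈ t) : x ≤ t.foldl max b := by
  induction t generalizing b with
  | nil => simp at h
  | cons y s ih =>
    rcases List.mem_cons.mp h with h | h
    · subst h; exact le_trans (le_max_right b x) (init_le_foldl_max s _)
    · exact ih (max b y) h

theorem le_pyMaxD (xs : List Int) (x : Int) (hx : x ∈ xs) : x ≤ pyMaxD xs := by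
  cases xs with
  | nil => simp at hx
  | cons y t =>
    rcases List.mem_cons.mp hx with h | h
    · subst h; exact init_le_foldl_max t x
    · exact foldl_max_ge t y x h

-- last argmax of f over range' l len: in range, strictly above all later, value = pyMaxD
theorem lastArgmax (f : Nat → Int) (l len : Nat) (h : 0 < len) :
    ∃ i, i ∈ List.range' l len ∧ (∀ j ∈ List.range' l len, i < j → f j < f i) ∧
      f i = pyMaxD ((List.range' l len).map f) := by
  induction len with
  | zero => omega
  | succ m ih =>
    cases Nat.eq_zero_or_pos m with
    | inl hm =>
      subst hm
      refine ⟨l, by simp, ?_, by simp [pyMaxD]⟩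
      intro j hj hlt
      have := List.mem_range'_1.mp hj; omega
    | inr hm =>
      obtain ⟨i, hi, hgt, hval⟩ := ih hm
      have hrange : List.range' l (m+1) = List.range' l m ++ [l+m] := by
        simp [List.range'_concat]
      have hne : (List.range' l m).map f ≠ [] := by simp; omega
      by_cases hc : f i ≤ f (l+m)
      · refine ⟨l+m, by simp [hrange], ?_, ?_⟩
        · intro j hj hlt
          rw [hrange] at hj
          rcases List.mem_append.mp hj with hj | hj
          · have := List.mem_range'_1.mp hj; omega
          · simp at hj; omega
        · rw [hrange, List.map_append, List.map_cons, List.map_nil,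
            pyMaxD_append _ _ hne, ← hval]
          omega
      · refine ⟨i, by rw [hrange]; exact List.mem_append.mpr (Or.inl hi), ?_, ?_⟩
        · intro j hj hlt
          rw [hrange] at hj
          rcases List.mem_append.mp hj with hj | hj
          · exact hgt j hj hlt
          · simp at hj; subst hj; omega
        · rw [hrange, List.map_append, List.map_cons, List.map_nil,
            pyMaxD_append _ _ hne, ← hval]
          omega

-- elements of dqSpec lie in [l, e)
theorem dqSpec_mem (ct : List Int) (l e i : Nat) (h : i ∈ dqSpec ct l e) :
    l ≤ i ∧ i < e ∧ goodB ct e i = true := by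
  have h1 := List.mem_of_mem_filter h
  have h2 := List.of_mem_filter h
  have := List.mem_range'_1.mp h1
  exact ⟨this.1, by omega, h2⟩

-- head of dqSpec exists and carries the window maximum (l < e)
theorem dqSpec_head (ct : List Int) (l e : Nat) (h : l < e) :
    ∃ f rest, dqSpec ct l e = f :: rest ∧
      ct.getD f 0 = pyMaxD ((List.range' l (e - l)).map (fun i => ct.getD i 0)) := by
  obtain ⟨i0, hi0, hgt, hval⟩ := lastArgmax (fun i => ct.getD i 0) l (e - l) (by omega)
  obtain ⟨hl0, hlt0⟩ : l ≤ i0 ∧ i0 < l + (e - l) := List.mem_range'_1.mp hi0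
  have hsplit : List.range' l (e - l)
      = List.range' l (i0 - l) ++ i0 :: List.range' (i0+1) (e - (i0+1)) := by
    have h1 : List.range' i0 (e - i0) = i0 :: List.range' (i0+1) (e - (i0+1)) := by
      have : e - i0 = (e - (i0+1)) + 1 := by omega
      rw [this, List.range'_succ]
    rw [← h1]
    have h2 : l + (i0 - l) = i0 := by omega
    have h3 : (i0 - l) + (e - i0) = e - l := by omega
    rw [← h3, ← List.range'_append]
    simp [h2]
  have hgood : goodB ct e i0 = true := by
    simp only [goodB, List.all_eq_true]
    intro j hj
    obtain ⟨hj1, hj2⟩ := List.mem_range'_1.mp hj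
    refine decide_eq_true (hgt j ?_ (by omega))
    exact List.mem_range'_1.mpr ⟨by omega, by omega⟩
  have hbad : ∀ i ∈ List.range' l (i0 - l), goodB ct e i = false := by
    intro i hi
    obtain ⟨hi1, hi2⟩ := List.mem_range'_1.mp hi
    by_contra hcon
    have hgd : goodB ct e i = true := by
      cases hq : goodB ct e i with
      | false => exact absurd hq hcon
      | true => rfl
    simp only [goodB, List.all_eq_true] at hgd
    have hmem : i0 ∈ List.range' (i+1) (e - (i+1)) :=
      List.mem_range'_1.mpr ⟨by omega, by omega⟩
    have h1 : ct.getD i0 0 < ct.getD i 0 := of_decide_eq_true (hgd i0 hmem)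
    have h2 : ct.getD i 0 ≤ ct.getD i0 0 := by
      rw [hval]
      exact le_pyMaxD _ _ (List.mem_map.mpr ⟨i, List.mem_range'_1.mpr ⟨hi1, by omega⟩, rfl⟩)
    omega
  refine ⟨i0, (List.range' (i0+1) (e - (i0+1))).filter (goodB ct e), ?_, hval⟩
  rw [dqSpec, hsplit, List.filter_append, List.filter_cons_of_pos hgood,
    List.filter_eq_nil_iff.mpr (by intro a ha; simp [hbad a ha]), List.nil_append]

-- moving the left end: drop l from the front iff it is the head
theorem dqSpec_popleft (ct : List Int) (l e : Nat) (h : l < e) :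
    dqSpec ct (l+1) e = (match dqSpec ct l e with
      | [] => []
      | f :: rest => if f = l then rest else f :: rest) := by
  have hr : List.range' l (e - l) = l :: List.range' (l+1) (e - (l+1)) := by
    have : e - l = (e - (l+1)) + 1 := by omega
    rw [this, List.range'_succ]
  have hd : dqSpec ct l e
      = (if goodB ct e l then [l] else []) ++ dqSpec ct (l+1) e := by
    rw [dqSpec, hr]
    by_cases hg : goodB ct e l = true
    · rw [List.filter_cons_of_pos hg]; simp [hg, dqSpec]
    · rw [List.filter_cons_of_neg (by simpa using hg)]; simp [hg, dqSpec]
  by_cases hg : goodB ct e l = true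
  · rw [hd]; simp [hg]
  · rw [hd]; simp [hg]
    cases hq : dqSpec ct (l+1) e with
    | nil => rfl
    | cons f rest =>
      have hf : l + 1 ≤ f := (dqSpec_mem ct (l+1) e f (by rw [hq]; simp)).1
      have hred : (match f :: rest with
          | [] => ([] : List Nat)
          | f :: rest => if f = l then rest else f :: rest)
          = if f = l then rest else f :: rest := rfl
      rw [hred, if_neg (by omega)]

-- generic: filtering a list in which any later survivor forces earlier survival
-- equals popping failures from the back
theorem filter_eq_dropWhile_reverse (p : Nat → Bool) (dq : List Nat)
    (hp : List.Pairwise (fun a b => p b = true → p a = true) dq) :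
    dq.filter p = (dq.reverse.dropWhile (fun i => ! p i)).reverse := by
  induction dq using List.reverseRecOn with
  | nil => simp
  | append_singleton xs a ih =>
    have hpxs : List.Pairwise (fun a b => p b = true → p a = true) xs :=
      (List.pairwise_append.mp hp).1
    by_cases hpa : p a = true
    · have hall : ∀ x ∈ xs, p x = true := by
        intro x hx
        exact (List.pairwise_append.mp hp).2.2 x hx a (by simp) hpa
      simp [List.filter_append, hpa, List.filter_eq_self.mpr hall]
    · have hpa' : p a = false := by simpa using hpa
      simp [List.filter_append, hpa', ih hpxs]

-- dqSpec is good-for-r and strictly decreasing in charge values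
theorem dqSpec_pairwise (ct : List Int) (l r : Nat) :
    List.Pairwise (fun a b => ct.getD b 0 < ct.getD a 0) (dqSpec ct l r) := by
  have h1 : List.Pairwise (· < ·) (List.range' l (r - l)) := List.pairwise_lt_range' ..
  have h2 : List.Pairwise (· < ·) (dqSpec ct l r) :=
    List.Pairwise.sublist List.filter_sublist h1
  refine List.Pairwise.imp_of_mem ?_ h2
  intro a b ha hb hab
  obtain ⟨_, hbr, _⟩ := dqSpec_mem ct l r b hb
  obtain ⟨_, _, hga⟩ := dqSpec_mem ct l r a ha
  simp only [goodB, List.all_eq_true] at hga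
  exact of_decide_eq_true (hga b (List.mem_range'_1.mpr ⟨by omega, by omega⟩))

-- pushing r: dqSpec for the extended window is B's pop-back-then-append
theorem dqSpec_push (ct : List Int) (l r : Nat) (h : l ≤ r) :
    dqSpec ct l (r+1) = bPush ct r (dqSpec ct l r) := by
  have hr : List.range' l (r+1-l) = List.range' l (r-l) ++ [r] := by
    have h1 : r + 1 - l = (r - l) + 1 := by omega
    have h2 : l + (r - l) = r := by omega
    rw [h1]; simp [List.range'_concat, h2]
  have hgr : goodB ct (r+1) r = true := by simp [goodB]
  have hsplit : ∀ i ∈ List.range' l (r-l),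
      goodB ct (r+1) i = (goodB ct r i && decide (ct.getD r 0 < ct.getD i 0)) := by
    intro i hi
    obtain ⟨hi1, hi2⟩ := List.mem_range'_1.mp hi
    have h1 : r + 1 - (i+1) = (r - (i+1)) + 1 := by omega
    have h2 : (i+1) + (r - (i+1)) = r := by omega
    simp only [goodB, h1]
    rw [List.range'_concat]
    simp [List.all_append, h2, Bool.and_comm]
  have step1 : dqSpec ct l (r+1)
      = (dqSpec ct l r).filter (fun i => decide (ct.getD r 0 < ct.getD i 0)) ++ [r] := by
    rw [dqSpec, hr, List.filter_append, List.filter_cons_of_pos hgr,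
      List.filter_congr hsplit, dqSpec, List.filter_filter]
    congr 1
    exact List.filter_congr (by intro a _; rw [Bool.and_comm])
  rw [step1, bPush]
  congr 1
  have hpair : List.Pairwise
      (fun a b => decide (ct.getD r 0 < ct.getD b 0) = true →
        decide (ct.getD r 0 < ct.getD a 0) = true) (dqSpec ct l r) := by
    refine (dqSpec_pairwise ct l r).imp ?_
    intro a b hab hb
    have h1 := of_decide_eq_true hb
    exact decide_eq_true (by omega)
  rw [filter_eq_dropWhile_reverse _ _ hpair]
  congr 2
  funext i
  rw [PySem.List.pyGetD_natCast, PySem.List.pyGetD_natCast]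
  by_cases hc : ct.getD r 0 < ct.getD i 0
  · have h1 : ¬(ct[i]?.getD 0 ≤ ct[r]?.getD 0) := not_le.mpr hc
    simp [show ct[r]?.getD 0 < ct[i]?.getD 0 from hc, h1]
  · have h1 : ct[i]?.getD 0 ≤ ct[r]?.getD 0 := not_lt.mp hc
    simp [show ¬(ct[r]?.getD 0 < ct[i]?.getD 0) from hc, h1]

-- coupled inner loops: B's fueled while mirrors A's, preserving the deque/sum invariants
theorem inner_eq (ct rc ps : List Int) (budget : Int) (r : Nat)
    (hps : ps = List.scanl (· + ·) 0 rc)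
    (hb : 0 ≤ budget) (hct : r < ct.length) (hrc : r < rc.length) :
    ∀ fuel l, l ≤ r + 1 → r + 1 - l ≤ fuel →
      aWhile ct ps budget r fuel l ≤ r + 1 ∧
      bWhile ct rc budget r fuel (dqSpec ct l (r+1), ps.getD (r+1) 0 - ps.getD l 0, l)
      = (dqSpec ct (aWhile ct ps budget r fuel l) (r+1),
         ps.getD (r+1) 0 - ps.getD (aWhile ct ps budget r fuel l) 0,
         aWhile ct ps budget r fuel l) := by
  have hcast : ∀ m : Nat, ((m : Nat) : Int) + 1 = (((m+1 : Nat)) : Int) := by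
    intro m; push_cast; ring
  intro fuel
  induction fuel with
  | zero =>
    intro l hl hfuel
    have hleq : l = r + 1 := by omega
    subst hleq
    exact ⟨le_rfl, rfl⟩
  | succ fuel ih =>
    intro l hl hfuel
    by_cases hleq : l = r + 1
    · subst hleq
      have hslice : PySem.List.slice ct (some ((r+1 : Nat) : Int)) (some ((r : Int) + 1)) = [] := by
        rw [show (some ((r:Int) + 1) : Option Int) = some (((r+1:Nat)) : Int) from by rw [hcast r]]
        rw [PySem.List.slice_natCast]
        simp
      have hcnd : ¬(pyMaxD (PySem.List.slice ct (some (((r+1:Nat)) : Int)) (some ((r:Int)+1)))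
          + (PySem.List.pyGetD ps ((r:Int)+1) 0 - PySem.List.pyGetD ps (((r+1:Nat)):Int) 0)
            * ((r:Int) - (((r+1:Nat)):Int) + 1) > budget) := by
        rw [hslice]
        rw [show ((r:Int) + 1) = (((r+1:Nat)) : Int) from (hcast r)]
        simp [pyMaxD]
        exact hb
      have hA : aWhile ct ps budget r (fuel+1) (r+1) = r + 1 := by
        rw [aWhile, if_neg hcnd]
      rw [hA, dqSpec_empty]
      constructor
      · omega
      · rw [bWhile]
    · have hlr : l ≤ r := by omega
      obtain ⟨f, rest, hdq, hval⟩ := dqSpec_head ct l (r+1) (by omega)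
      have hfmem := dqSpec_mem ct l (r+1) f (by rw [hdq]; simp)
      -- A's slice max equals ct[f]
      have hslice : PySem.List.slice ct (some ((l : Nat) : Int)) (some ((r : Int) + 1))
          = (List.range' l (r+1-l)).map (fun i => ct.getD i 0) := by
        rw [show (some ((r:Int) + 1) : Option Int) = some (((r+1:Nat)) : Int) from by rw [hcast r]]
        rw [PySem.List.slice_natCast]
        exact slice_eq_map ct l (r+1-l) (by omega)
      have hmax : pyMaxD (PySem.List.slice ct (some ((l : Nat) : Int)) (some ((r : Int) + 1)))
          = ct.getD f 0 := by
        rw [hslice, hval]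
      -- the two loop conditions agree
      set s := ps.getD (r+1) 0 - ps.getD l 0 with hs
      have hcond : (PySem.List.pyGetD ct (f : Int) 0 + ((r : Int) - (l : Int) + 1) * s > budget)
          ↔ (pyMaxD (PySem.List.slice ct (some ((l : Nat) : Int)) (some ((r : Int) + 1)))
              + (PySem.List.pyGetD ps ((r : Int) + 1) 0 - PySem.List.pyGetD ps (l : Int) 0)
                * ((r : Int) - (l : Int) + 1) > budget) := by
        rw [hmax, PySem.List.pyGetD_natCast, PySem.List.pyGetD_natCast ps l,
          show ((r:Int) + 1) = (((r+1:Nat)) : Int) from (hcast r), PySem.List.pyGetD_natCast]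
        constructor <;> intro h1 <;> [linarith [mul_comm ((r : Int) - (l : Int) + 1) s];
          linarith [mul_comm s ((r : Int) - (l : Int) + 1)]]
      by_cases hc : PySem.List.pyGetD ct (f : Int) 0 + ((r : Int) - (l : Int) + 1) * s > budget
      · -- both loops advance l
        have hA : aWhile ct ps budget r (fuel+1) l = aWhile ct ps budget r fuel (l+1) := by
          rw [aWhile, if_pos (hcond.mp hc)]
        have hs' : s - PySem.List.pyGetD rc (l : Int) 0
            = ps.getD (r+1) 0 - ps.getD (l+1) 0 := by
          rw [PySem.List.pyGetD_natCast, hs, hps, scanl_getD_succ rc l (by omega)]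
          simp [List.getD]
          ring
        have hdq' : (if f = l then rest else f :: rest) = dqSpec ct (l+1) (r+1) := by
          rw [dqSpec_popleft ct l (r+1) (by omega), hdq]
        have hB : bWhile ct rc budget r (fuel+1) (dqSpec ct l (r+1), s, l)
            = bWhile ct rc budget r fuel
                (dqSpec ct (l+1) (r+1), ps.getD (r+1) 0 - ps.getD (l+1) 0, l+1) := by
          rw [hdq, bWhile, if_pos hc, hdq', hs']
        rw [hA, hB]
        exact ih (l+1) (by omega) (by omega)
      · -- both loops stop at l
        have hA : aWhile ct ps budget r (fuel+1) l = l := by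
          rw [aWhile, if_neg (fun hcc => hc (hcond.mpr hcc))]
        have hB : bWhile ct rc budget r (fuel+1) (dqSpec ct l (r+1), s, l)
            = (dqSpec ct l (r+1), s, l) := by
          rw [hdq, bWhile, if_neg hc, ← hdq]
        rw [hA, hB]
        exact ⟨by omega, rfl⟩

-- outer loop invariant
theorem outer_inv (ct rc : List Int) (budget : Int)
    (hlen : ct.length ≤ rc.length) (hb : 0 ≤ budget) (k : Nat) (hk : k ≤ ct.length) :
    ∃ l res, l ≤ k ∧
      (List.range k).foldl (fun (st : Nat × Int) (r : Nat) =>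
        let l := aWhile ct (List.scanl (· + ·) 0 rc) budget r (r + 1) st.1
        (l, max st.2 ((r : Int) - (l : Int) + 1))) (0, 0) = (l, res) ∧
      (List.range k).foldl (fun (st : List Nat × Int × Nat × Int) (r : Nat) =>
        let dq1 := bPush ct r st.1
        let s1 := st.2.1 + PySem.List.pyGetD rc (r : Int) 0
        let w := bWhile ct rc budget r (r + 1) (dq1, s1, st.2.2.1)
        (w.1, w.2.1, w.2.2, max st.2.2.2 ((r : Int) - (w.2.2 : Int) + 1))) ([], 0, 0, 0)
      = (dqSpec ct l k,
         (List.scanl (· + ·) (0:Int) rc).getD k 0 - (List.scanl (· + ·) (0:Int) rc).getD l 0,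
         l, res) := by
  induction k with
  | zero =>
    exact ⟨0, 0, le_rfl, rfl, by simp [dqSpec_empty, sub_self]⟩
  | succ k ihk =>
    obtain ⟨l, res, hlk, hA, hB⟩ := ihk (by omega)
    set ps := List.scanl (· + ·) (0:Int) rc with hps
    have hrange : List.range (k+1) = List.range k ++ [k] := by
      rw [List.range_succ]
    obtain ⟨hl', hinner⟩ := inner_eq ct rc ps budget k hps hb (by omega) (by omega)
      (k+1) l (by omega) (by omega)
    refine ⟨aWhile ct ps budget k (k+1) l,
      max res ((k : Int) - ((aWhile ct ps budget k (k+1) l : Nat) : Int) + 1), hl', ?_, ?_⟩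
    · rw [hrange, List.foldl_append, hA]
      simp
    · rw [hrange, List.foldl_append, hB]
      simp only [List.foldl_cons, List.foldl_nil]
      have hpush : bPush ct k (dqSpec ct l k) = dqSpec ct l (k+1) :=
        (dqSpec_push ct l k hlk).symm
      have hsum : ps.getD k 0 - ps.getD l 0 + PySem.List.pyGetD rc (k : Int) 0
          = ps.getD (k+1) 0 - ps.getD l 0 := by
        rw [PySem.List.pyGetD_natCast, hps, scanl_getD_succ rc k (by omega)]
        simp [List.getD]
        ring
      simp only [hpush, hsum, hinner]

-- ===== VERDICT (by name: the statement is the Claim_ definition above) =====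
theorem maximumRobots1_spec : Claim_equal_maximumRobots1 := by
  intro ct rc budget _hdom hpre
  obtain ⟨hlen, hb⟩ := hpre
  obtain ⟨l, res, _, hA, hB⟩ := outer_inv ct rc budget hlen hb ct.length le_rfl
  unfold Spec_maximumRobots1 maximumRobots1 maximumRobots1_alt
  simp only [hA, hB]
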